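-- pv_equiv track=rewrite | github.com/franciscofornicola/audio-transcriber-streamlit | app.py | _normalize_transcript_text
-- ===== SOURCE A (Python) =====
-- def _normalize_transcript_text(text: str) -> str:
--     transcript = text.strip()
--     # Ajustes leves de espacamento antes de pontuacao.
--     for a, b in [
--         (" .", "."),
--         (" ,", ","),
--         (" ?", "?"),
--         (" !", "!"),
--         (" :", ":"),
--         (" ;", ";"),
--     ]:
--         transcript = transcript.replace(a, b)
--     return transcript
-- ===== SOURCE B (Python) =====
-- def _normalize_transcript_text(text: str) -> str:
--     s = text.strip()
--     out = []
--     i = 0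
--     while i < len(s):
--         if s[i] == " " and i + 1 < len(s) and s[i + 1] in ".,?!:;":
--             pass  # drop this space: it immediately precedes punctuation
--         else:
--             out.append(s[i])
--         i += 1
--     return "".join(out)
-- ===== Notes on version B (the rewrite author's own statement) =====
-- stated objective: alternative
-- what changed: Replaces six sequential whole-string .replace passes by a single forward scan that drops each space whose next character is one of .,?!:;
import Mathlib
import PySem

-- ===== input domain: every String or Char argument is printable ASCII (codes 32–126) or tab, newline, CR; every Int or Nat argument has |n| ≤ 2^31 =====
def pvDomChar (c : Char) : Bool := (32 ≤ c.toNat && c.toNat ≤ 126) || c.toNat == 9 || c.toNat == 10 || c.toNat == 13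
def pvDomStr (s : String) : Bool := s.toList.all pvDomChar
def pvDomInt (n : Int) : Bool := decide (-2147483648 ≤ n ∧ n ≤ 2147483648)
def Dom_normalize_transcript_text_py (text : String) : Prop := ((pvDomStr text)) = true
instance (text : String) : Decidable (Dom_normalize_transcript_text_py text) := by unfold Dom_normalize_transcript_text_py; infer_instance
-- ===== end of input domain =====

-- B replaces A's six sequential whole-string replace passes by one forward scan
-- that drops each space whose next character is one of ".,?!:;" (objective: alternative).

-- ===== PORT A =====
def normalize_transcript_text_py (text : String) : String :=
  let transcript := PySem.Str.strip text
  [(" .", "."), (" ,", ","), (" ?", "?"), (" !", "!"), (" :", ":"), (" ;", ";")].foldl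
    (fun t (ab : String × String) => PySem.Str.replace t ab.1 ab.2) transcript

-- ===== PORT B =====
-- the punctuation characters of ".,?!:;"
def pvPuncts : List Char := ['.', ',', '?', '!', ':', ';']

-- the while loop of Source B: one pass, skipping a space whose successor is punctuation
def pvScan : List Char → List Char
  | [] => []
  | c :: t =>
    if c == ' ' && (match t with | q :: _ => pvPuncts.contains q | [] => false) then
      pvScan t
    else
      c :: pvScan t

def normalize_transcript_text_py_alt (text : String) : String :=
  String.ofList (pvScan (PySem.Chars.strip text.toList))

-- ===== PRECONDITION & SPEC =====
def Spec_normalize_transcript_text_py (text : String) (out : String) : Prop := out = normalize_transcript_text_py_alt text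
instance (text : String) (out : String) : Decidable (Spec_normalize_transcript_text_py text out) := by unfold Spec_normalize_transcript_text_py; infer_instance

-- ===== CLAIM (what is proved, stated in full; the proofs are below) =====
def Claim_equal_normalize_transcript_text_py : Prop := ∀ (text : String), Dom_normalize_transcript_text_py text → Spec_normalize_transcript_text_py text (normalize_transcript_text_py text)

-- ===== LEMMAS AND PROOFS =====

-- one replace pass: what s.replace(" " + p, p) computes
def pvRep (p : Char) : List Char → List Char
  | ' ' :: q :: t => if q = p then q :: pvRep p t else ' ' :: pvRep p (q :: t)
  | c :: t => c :: pvRep p t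
  | [] => []

-- drop every space followed by a character of S
def pvRem (S : List Char) : List Char → List Char
  | ' ' :: q :: t => if q ∈ S then pvRem S (q :: t) else ' ' :: pvRem S (q :: t)
  | c :: t => c :: pvRem S t
  | [] => []

theorem pvRep_cons_ne_space (p : Char) {c : Char} (hc : c ≠ ' ') (t : List Char) :
    pvRep p (c :: t) = c :: pvRep p t := by
  cases t <;> (rw [pvRep.eq_def]; simp [hc])

theorem pvRem_cons_ne_space (S : List Char) {c : Char} (hc : c ≠ ' ') (t : List Char) :
    pvRem S (c :: t) = c :: pvRem S t := by
  cases t <;> (rw [pvRem.eq_def]; simp [hc])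

theorem pvRem_singleton (S : List Char) (c : Char) : pvRem S [c] = [c] := by
  rw [pvRem.eq_def]; rcases Decidable.em (c = ' ') with hc | hc <;> simp [hc, pvRem]

theorem pvRep_singleton (p : Char) (c : Char) : pvRep p [c] = [c] := by
  rw [pvRep.eq_def]; rcases Decidable.em (c = ' ') with hc | hc <;> simp [hc, pvRep]

theorem pvRem_nil_left : ∀ l, pvRem [] l = l := by
  intro l
  induction l using pvRem.induct [] with
  | case1 q t h ih => exact absurd h List.not_mem_nil
  | case2 q t h ih => simp [pvRem, ih]
  | case3 c t h ih =>
    cases t with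
    | nil => exact pvRem_singleton [] c
    | cons q t' =>
      have hc : c ≠ ' ' := fun hc => h q t' hc rfl
      rw [pvRem_cons_ne_space [] hc, ih]
  | case4 => rfl

theorem pvReplace_go_eq (p : Char) :
    ∀ fuel l acc, l.length ≤ fuel →
      PySem.Chars.replace.go [' ', p] [p] fuel l acc = acc.reverse ++ pvRep p l := by
  intro fuel
  induction fuel with
  | zero =>
    intro l acc h
    have : l = [] := List.eq_nil_of_length_eq_zero (Nat.le_zero.mp h)
    subst this; simp [PySem.Chars.replace.go, pvRep]
  | succ n ih =>
    intro l acc h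
    cases l with
    | nil => simp [PySem.Chars.replace.go, pvRep]
    | cons c t =>
      rw [PySem.Chars.replace.go]
      cases t with
      | nil =>
        have hp : [' ', p].isPrefixOf [c] = false := by simp [List.isPrefixOf]
        simp only [hp, Bool.false_eq_true, if_false]
        rw [ih [] (c :: acc) (by simp)]
        simp [pvRep, pvRep_singleton]
      | cons q t' =>
        by_cases hcq : c = ' ' ∧ q = p
        · obtain ⟨rfl, rfl⟩ := hcq
          have hp : [' ', q].isPrefixOf (' ' :: q :: t') = true := by simp [List.isPrefixOf]
          simp only [hp, if_true]
          have hd : List.drop [' ', q].length (' ' :: q :: t') = t' := rfl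
          rw [hd, ih t' ([q].reverse ++ acc) (by simp at h; omega)]
          simp [pvRep]
        · have hp : [' ', p].isPrefixOf (c :: q :: t') = false := by
            simp [List.isPrefixOf]
            intro h1 h2
            exact hcq ⟨h1.symm, h2.symm⟩
          simp only [hp, Bool.false_eq_true, if_false]
          rw [ih (q :: t') (c :: acc) (Nat.le_of_succ_le_succ h)]
          have hstep : pvRep p (c :: q :: t') = c :: pvRep p (q :: t') := by
            rcases Decidable.em (c = ' ') with hc | hc
            · subst hc
              have hq : ¬ q = p := fun hq => hcq ⟨rfl, hq⟩
              simp [pvRep, hq]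
            · exact pvRep_cons_ne_space p hc _
          simp [hstep]

theorem pvReplace_eq (p : Char) (l : List Char) :
    PySem.Chars.replace l [' ', p] [p] = pvRep p l := by
  simp [PySem.Chars.replace]
  exact pvReplace_go_eq p l.length l [] (le_refl _)

-- the first character of a pass applied to a space-headed list is the space or p
theorem pvRep_head_space (p : Char) (t : List Char) :
    ∃ r rs, pvRep p (' ' :: t) = r :: rs ∧ (r = ' ' ∨ r = p) := by
  cases t with
  | nil => exact ⟨' ', [], by simp [pvRep], Or.inl rfl⟩
  | cons q t' =>
    by_cases hq : q = p
    · exact ⟨p, pvRep p t', by simp [pvRep, hq], Or.inr rfl⟩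
    · exact ⟨' ', pvRep p (q :: t'), by simp [pvRep, hq], Or.inl rfl⟩

-- key commutation: one replace pass for p, then removal for S, is removal for p :: S
theorem pvRem_rep (p : Char) (S : List Char) (hp : p ≠ ' ') (hpS : p ∉ S) (hsS : ' ' ∉ S) :
    ∀ l, pvRem S (pvRep p l) = pvRem (p :: S) l := by
  intro l
  induction l using pvRep.induct p with
  | case1 t ih =>
    have h1 : pvRep p (' ' :: p :: t) = p :: pvRep p t := by simp [pvRep]
    rw [h1, pvRem_cons_ne_space S hp, ih]
    have h2 : pvRem (p :: S) (' ' :: p :: t) = pvRem (p :: S) (p :: t) := by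
      simp [pvRem]
    rw [h2, pvRem_cons_ne_space (p :: S) hp]
  | case2 q t hqp ih =>
    have h1 : pvRep p (' ' :: q :: t) = ' ' :: pvRep p (q :: t) := by simp [pvRep, hqp]
    rw [h1]
    rcases Decidable.em (q = ' ') with hq | hq
    · subst hq
      obtain ⟨r, rs, hrep, hr⟩ := pvRep_head_space p t
      have hrS : r ∉ S := by rcases hr with rfl | rfl <;> assumption
      rw [hrep, show pvRem S (' ' :: r :: rs) = ' ' :: pvRem S (r :: rs) from by simp [pvRem, hrS]]
      rw [← hrep, ih]
      have hsp : (' ' : Char) ∉ p :: S := by simp [hsS, Ne.symm hp]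
      simp [pvRem, hsp]
    · have hrep : pvRep p (q :: t) = q :: pvRep p t := pvRep_cons_ne_space p hq t
      rcases Decidable.em (q ∈ S) with hqS | hqS
      · rw [hrep, show pvRem S (' ' :: q :: pvRep p t) = pvRem S (q :: pvRep p t) from by simp [pvRem, hqS]]
        rw [← hrep, ih]
        have hmem : q ∈ p :: S := List.mem_cons_of_mem _ hqS
        simp [pvRem, hmem]
      · rw [hrep, show pvRem S (' ' :: q :: pvRep p t) = ' ' :: pvRem S (q :: pvRep p t) from by simp [pvRem, hqS]]
        rw [← hrep, ih]
        have hmem : q ∉ p :: S := by simp [hqS, hqp]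
        simp [pvRem, hmem]
  | case3 c t h ih =>
    cases t with
    | nil =>
      rcases Decidable.em (c = ' ') with hc | hc
      · subst hc; simp [pvRep, pvRem]
      · rw [pvRep_cons_ne_space p hc, pvRem_cons_ne_space S hc,
            pvRem_cons_ne_space (p :: S) hc]
        simp [pvRep, pvRem]
    | cons q t' =>
      have hc : c ≠ ' ' := fun hc => h q t' hc rfl
      rw [pvRep_cons_ne_space p hc, pvRem_cons_ne_space S hc, ih,
          pvRem_cons_ne_space (p :: S) hc]
  | case4 => simp [pvRep, pvRem]

theorem pvScan_space_cons (q : Char) (t : List Char) :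
    pvScan (' ' :: q :: t) = if pvPuncts.contains q then pvScan (q :: t) else ' ' :: pvScan (q :: t) := by
  simp [pvScan]

theorem pvScan_cons_ne_space {c : Char} (hc : c ≠ ' ') (t : List Char) :
    pvScan (c :: t) = c :: pvScan t := by
  cases t <;> simp [pvScan, hc]

theorem pvScan_singleton (c : Char) : pvScan [c] = [c] := by
  simp [pvScan]

-- B's scan is pvRem for the punctuation list
theorem pvScan_eq_pvRem : ∀ l, pvScan l = pvRem pvPuncts l := by
  intro l
  induction l using pvRem.induct pvPuncts with
  | case1 q t h ih =>
    rw [pvScan_space_cons, if_pos (by simpa using h), ih,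
      show pvRem pvPuncts (' ' :: q :: t) = pvRem pvPuncts (q :: t) from by simp [pvRem, h]]
  | case2 q t h ih =>
    rw [pvScan_space_cons, if_neg (by simpa using h), ih,
      show pvRem pvPuncts (' ' :: q :: t) = ' ' :: pvRem pvPuncts (q :: t) from by simp [pvRem, h]]
  | case3 c t h ih =>
    cases t with
    | nil => rw [pvScan_singleton, pvRem_singleton]
    | cons q t' =>
      have hc : c ≠ ' ' := fun hc => h q t' hc rfl
      rw [pvRem_cons_ne_space pvPuncts hc, pvScan_cons_ne_space hc, ih]
  | case4 => rfl

-- the six passes, in A's order, remove exactly the spaces before ".,?!:;"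
theorem pvChain_eq (cs : List Char) :
    pvRep ';' (pvRep ':' (pvRep '!' (pvRep '?' (pvRep ',' (pvRep '.' cs))))) =
      pvRem pvPuncts cs := by
  rw [← pvRem_nil_left (pvRep ';' _)]
  rw [pvRem_rep ';' [] (by decide) (by decide) (by decide)]
  rw [pvRem_rep ':' [';'] (by decide) (by decide) (by decide)]
  rw [pvRem_rep '!' [':', ';'] (by decide) (by decide) (by decide)]
  rw [pvRem_rep '?' ['!', ':', ';'] (by decide) (by decide) (by decide)]
  rw [pvRem_rep ',' ['?', '!', ':', ';'] (by decide) (by decide) (by decide)]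
  rw [pvRem_rep '.' [',', '?', '!', ':', ';'] (by decide) (by decide) (by decide)]
  rfl

-- ===== VERDICT (by name: the statement is the Claim_ definition above) =====
theorem normalize_transcript_text_py_spec : Claim_equal_normalize_transcript_text_py := by
  intro text _
  unfold Spec_normalize_transcript_text_py normalize_transcript_text_py normalize_transcript_text_py_alt
  simp only [List.foldl, PySem.Str.replace, PySem.Str.strip, String.toList_ofList,
    show (" .").toList = [' ', '.'] from rfl, show (".").toList = ['.'] from rfl,
    show (" ,").toList = [' ', ','] from rfl, show (",").toList = [','] from rfl,
    show (" ?").toList = [' ', '?'] from rfl, show ("?").toList = ['?'] from rfl,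
    show (" !").toList = [' ', '!'] from rfl, show ("!").toList = ['!'] from rfl,
    show (" :").toList = [' ', ':'] from rfl, show (":").toList = [':'] from rfl,
    show (" ;").toList = [' ', ';'] from rfl, show (";").toList = [';'] from rfl,
    pvReplace_eq]
  rw [pvScan_eq_pvRem, pvChain_eq]
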